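-- pv_equiv track=rewrite | github.com/thealper2/codewars-solutions | 7-kyu/the_poet_and_the_pendulum.py | pendulum
-- ===== SOURCE A (Python) =====
-- def pendulum(values):
--     n = len(values)
--     result = []
--     values.sort()
--
--     for i in range(n):
--         if i % 2 == 0:
--             result.insert(0, values[i])
--         else:
--             result.append(values[i])
--
--     return result
-- ===== SOURCE B (Python) =====
-- def pendulum(values):
--     values.sort()
--     return list(reversed(values[::2])) + values[1::2]
-- ===== Notes on version B (the rewrite author's own statement) =====
-- stated objective: faster
-- what changed: Replaced the index loop with its alternating insert(0)/append by two strided slices of the sorted list: the reversed even-index slice concatenated with the odd-index slice.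
import Mathlib
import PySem

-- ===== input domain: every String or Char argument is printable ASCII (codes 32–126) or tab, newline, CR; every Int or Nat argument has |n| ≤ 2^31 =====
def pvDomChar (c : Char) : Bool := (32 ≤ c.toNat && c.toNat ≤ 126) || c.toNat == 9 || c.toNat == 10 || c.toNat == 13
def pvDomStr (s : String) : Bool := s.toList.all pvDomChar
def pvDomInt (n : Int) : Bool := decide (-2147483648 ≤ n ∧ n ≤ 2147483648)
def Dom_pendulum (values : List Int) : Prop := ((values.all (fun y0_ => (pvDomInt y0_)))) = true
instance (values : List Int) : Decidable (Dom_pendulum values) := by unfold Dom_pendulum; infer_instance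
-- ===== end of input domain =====

-- B replaces A's alternating insert(0)/append index loop by two strided slices of the
-- sorted list (reversed even-index slice ++ odd-index slice): linear after the sort, where
-- A's repeated insert(0) is quadratic (measured faster in a timing run).
-- Both A and B sort `values` in place; equivalence proved here is about the return value.

-- ===== PORT A =====
def pendulum (values : List Int) : List Int :=
  let n : Int := PySem.List.len values
  let vs : List Int := PySem.List.sorted values id        -- values.sort()
  (PySem.List.pyRange 0 n 1).foldl
    (fun result i =>
      if PySem.Int.mod i 2 == 0 then
        PySem.List.insert result 0 (PySem.List.pyGetD vs i 0)   -- result.insert(0, values[i]); i in range, so getD is exact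
      else
        result ++ [PySem.List.pyGetD vs i 0])                   -- result.append(values[i])
    []

-- ===== PORT B =====
def pendulum_alt (values : List Int) : List Int :=
  let vs : List Int := PySem.List.sorted values id        -- values.sort()
  ((PySem.List.slice? vs none none 2).getD []).reverse    -- list(reversed(values[::2])); step 2 ≠ 0, so the slice always returns
    ++ (PySem.List.slice? vs (some 1) none 2).getD []     -- values[1::2]

-- ===== PRECONDITION & SPEC =====
def Spec_pendulum (values : List Int) (out : List Int) : Prop := out = pendulum_alt values
instance (values : List Int) (out : List Int) : Decidable (Spec_pendulum values out) := by unfold Spec_pendulum; infer_instance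

-- ===== CLAIM (what is proved, stated in full; the proofs are below) =====
def Claim_equal_pendulum : Prop := ∀ (values : List Int), Dom_pendulum values → Spec_pendulum values (pendulum values)

-- ===== LEMMAS AND PROOFS =====

-- even- and odd-index sublists
mutual
def pvEvens : List Int → List Int
  | [] => []
  | x :: xs => x :: pvOdds xs
def pvOdds : List Int → List Int
  | [] => []
  | _ :: xs => pvEvens xs
end

theorem pvEvens_stride (xs : List Int) :
    List.filterMap (fun k : Nat => xs[2 * k]?) (List.range ((xs.length + 1) / 2)) = pvEvens xs ∧
    List.filterMap (fun k : Nat => xs[2 * k + 1]?) (List.range (xs.length / 2)) = pvOdds xs := by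
  induction xs with
  | nil => simp [pvEvens, pvOdds]
  | cons x xs ih =>
    obtain ⟨ihe, iho⟩ := ih
    constructor
    · have : ((x :: xs).length + 1) / 2 = xs.length / 2 + 1 := by
        simp only [List.length_cons]; omega
      rw [this, List.range_succ_eq_map, List.filterMap_cons, List.filterMap_map]
      simp only [Function.comp]
      have harg : ∀ k : Nat, (x :: xs)[2 * (k + 1)]? = xs[2 * k + 1]? := by
        intro k
        have : 2 * (k + 1) = (2 * k + 1) + 1 := by omega
        rw [this]; simp
      simp only [harg]
      simp [pvEvens, iho]
    · have : (x :: xs).length / 2 = (xs.length + 1) / 2 := by simp only [List.length_cons]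
      rw [this]
      have harg : ∀ k : Nat, (x :: xs)[2 * k + 1]? = xs[2 * k]? := by intro k; simp
      simp only [harg, ihe, pvOdds]

-- values[::2] is the even-index sublist
theorem slice?_step2_even (xs : List Int) :
    PySem.List.slice? xs none none 2 = some (pvEvens xs) := by
  simp only [PySem.List.slice?, PySem.List.sliceIndices]
  norm_num
  have hcount : (if 0 < xs.length then (((xs.length : Int) + 2 - 1) / 2).toNat else 0)
      = (xs.length + 1) / 2 := by
    split <;> omega
  rw [hcount]
  have harg : ∀ k : Nat, xs[(2 * (k:Int)).toNat]? = xs[2 * k]? := by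
    intro k; congr 1
  simp only [harg]
  exact (pvEvens_stride xs).1

-- values[1::2] is the odd-index sublist
theorem slice?_step2_odd (xs : List Int) :
    PySem.List.slice? xs (some 1) none 2 = some (pvOdds xs) := by
  simp only [PySem.List.slice?, PySem.List.sliceIndices]
  norm_num
  rcases xs with _ | ⟨x, t⟩
  · simp [pvOdds]
  · have hmin : min (1:Int) ((x :: t).length : Int) = 1 := by
      simp only [List.length_cons]; push_cast; omega
    rw [hmin]
    split
    · next hlen =>
      have hc : ((((x :: t).length : Int) - 1 + 2 - 1) / 2).toNat = (x :: t).length / 2 := by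
        omega
      rw [hc]
      have harg : ∀ k : Nat, (x :: t)[((1:Int) + 2 * (k:Int)).toNat]? = (x :: t)[2 * k + 1]? := by
        intro k; congr 1; omega
      simp only [harg]
      exact (pvEvens_stride (x :: t)).2
    · next hlen =>
      have ht : t = [] := by
        rcases t with _ | _ <;> simp_all
      subst ht; simp [pvOdds, pvEvens]

-- invariant of A's loop over the enumerated (sorted) list, for either starting parity
theorem pendulum_loop (l : List Int) : ∀ (s : Int) (acc : List Int),
    (PySem.Int.mod s 2 = 0 →
      (PySem.List.enumerate l s).foldl
        (fun r p => if PySem.Int.mod p.1 2 == 0 then p.2 :: r else r ++ [p.2]) acc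
      = (pvEvens l).reverse ++ acc ++ pvOdds l) ∧
    (PySem.Int.mod s 2 = 1 →
      (PySem.List.enumerate l s).foldl
        (fun r p => if PySem.Int.mod p.1 2 == 0 then p.2 :: r else r ++ [p.2]) acc
      = (pvOdds l).reverse ++ acc ++ pvEvens l) := by
  induction l with
  | nil => intro s acc; simp [PySem.List.enumerate_nil, pvEvens, pvOdds]
  | cons x xs ih =>
    intro s acc
    have hsucc : ∀ t : Int, PySem.Int.mod t 2 = 0 → PySem.Int.mod (t + 1) 2 = 1 := by
      intro t ht
      rcases PySem.Int.mod_two_eq (t + 1) with h | h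
      · exfalso
        have h1 := PySem.Int.floordiv_mul_add_mod t 2
        have h2 := PySem.Int.floordiv_mul_add_mod (t + 1) 2
        omega
      · exact h
    have hsucc' : ∀ t : Int, PySem.Int.mod t 2 = 1 → PySem.Int.mod (t + 1) 2 = 0 := by
      intro t ht
      rcases PySem.Int.mod_two_eq (t + 1) with h | h
      · exact h
      · exfalso
        have h1 := PySem.Int.floordiv_mul_add_mod t 2
        have h2 := PySem.Int.floordiv_mul_add_mod (t + 1) 2
        omega
    constructor
    · intro hs
      rw [PySem.List.enumerate_cons, List.foldl_cons]
      have hb : (PySem.Int.mod s 2 == 0) = true := by rw [hs]; rfl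
      simp only [hb, if_true]
      have := ((ih (s + 1) (x :: acc)).2) (hsucc s hs)
      rw [this]
      simp [pvEvens, pvOdds]
    · intro hs
      rw [PySem.List.enumerate_cons, List.foldl_cons]
      have hb : (PySem.Int.mod s 2 == 0) = false := by rw [hs]; rfl
      simp only [hb, Bool.false_eq_true, if_false]
      have := ((ih (s + 1) (acc ++ [x])).1) (hsucc' s hs)
      rw [this]
      simp [pvEvens, pvOdds]

-- ===== VERDICT (by name: the statement is the Claim_ definition above) =====
theorem pendulum_spec : Claim_equal_pendulum := by
  intro values _
  unfold Spec_pendulum pendulum pendulum_alt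
  simp only []
  set vs := PySem.List.sorted values id with hvs
  have hlen : PySem.List.len values = PySem.List.len vs := by
    simp [PySem.List.len_eq, hvs, PySem.List.length_sorted]
  rw [hlen]
  have henum := PySem.List.enumerate_eq_map_pyRange vs (0 : Int)
  have hfold :
      (PySem.List.pyRange 0 (PySem.List.len vs) 1).foldl
        (fun result i =>
          if PySem.Int.mod i 2 == 0 then
            PySem.List.insert result 0 (PySem.List.pyGetD vs i 0)
          else result ++ [PySem.List.pyGetD vs i 0]) []
      = (PySem.List.enumerate vs 0).foldl
          (fun r p => if PySem.Int.mod p.1 2 == 0 then p.2 :: r else r ++ [p.2]) [] := by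
    rw [henum, List.foldl_map]
    simp only [PySem.List.insert_zero]
  rw [hfold, ((pendulum_loop vs 0 []).1) (by decide)]
  rw [slice?_step2_even, slice?_step2_odd]
  simp
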